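-- pv_equiv track=rewrite | github.com/HobanSearch/FinePrint | backend/scripts/prepare-lora-training.py | create_specialized_datasets
-- ===== SOURCE A (Python) =====
-- from typing import List, Dict, Any
--
-- def create_specialized_datasets(entries: List[Dict[str, Any]]) -> Dict[str, List[Dict[str, Any]]]:
--     """Create specialized datasets for different document categories"""
--
--     datasets = {
--         'general': [],
--         'social_media': [],
--         'ecommerce': [],
--         'financial': [],
--         'streaming': []
--     }
--
--     category_mapping = {
--         'Social Media': 'social_media',
--         'E-commerce': 'ecommerce',
--         'Financial Services': 'financial',
--         'Cryptocurrency': 'financial',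
--         'Video Streaming': 'streaming',
--         'Music Streaming': 'streaming'
--     }
--
--     for entry in entries:
--         # Add to general dataset
--         datasets['general'].append(entry)
--
--         # Add to specialized dataset if applicable
--         category = entry.get('category', '')
--         if category in category_mapping:
--             datasets[category_mapping[category]].append(entry)
--
--     return datasets
-- ===== SOURCE B (Python) =====
-- from typing import List, Dict, Any
--
-- def create_specialized_datasets(entries: List[Dict[str, Any]]) -> Dict[str, List[Dict[str, Any]]]:
--     """Create specialized datasets for different document categories"""
--     def cat(entry):
--         return entry.get('category', '')
--     return {
--         'general': list(entries),
--         'social_media': [e for e in entries if cat(e) == 'Social Media'],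
--         'ecommerce': [e for e in entries if cat(e) == 'E-commerce'],
--         'financial': [e for e in entries if cat(e) in ('Financial Services', 'Cryptocurrency')],
--         'streaming': [e for e in entries if cat(e) in ('Video Streaming', 'Music Streaming')],
--     }
-- ===== Notes on version B (the rewrite author's own statement) =====
-- stated objective: simpler
-- what changed: Replaces the single stateful routing loop over a mutable dict-of-lists with five independent passes: general is a copy of entries and each specialized dataset is its own comprehension filtering on the exact categories.
import Mathlib
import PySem

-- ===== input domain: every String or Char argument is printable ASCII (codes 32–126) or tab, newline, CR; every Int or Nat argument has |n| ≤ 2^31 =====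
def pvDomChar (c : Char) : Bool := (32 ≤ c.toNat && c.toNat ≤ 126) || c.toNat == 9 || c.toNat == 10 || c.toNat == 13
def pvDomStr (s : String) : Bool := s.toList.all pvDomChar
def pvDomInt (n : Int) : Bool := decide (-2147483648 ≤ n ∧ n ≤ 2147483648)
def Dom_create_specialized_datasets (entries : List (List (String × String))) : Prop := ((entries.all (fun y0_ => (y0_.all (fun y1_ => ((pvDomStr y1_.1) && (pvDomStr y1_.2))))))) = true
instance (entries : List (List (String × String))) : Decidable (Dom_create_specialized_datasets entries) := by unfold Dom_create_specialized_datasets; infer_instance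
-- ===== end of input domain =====

-- B replaces A's single stateful routing loop over a mutable dict-of-lists with five independent filtering passes (objective: simpler).

-- ===== PORT A =====
-- A's category_mapping dict
def pvCategoryMapping : PySem.Dict String String :=
  PySem.Dict.ofList [("Social Media", "social_media"), ("E-commerce", "ecommerce"),
    ("Financial Services", "financial"), ("Cryptocurrency", "financial"),
    ("Video Streaming", "streaming"), ("Music Streaming", "streaming")]

-- the body of A's for-loop: append to 'general', then to the mapped specialized dataset if any
def pvStepA (d : PySem.Dict String (List (List (String × String)))) (entry : List (String × String)) :
    PySem.Dict String (List (List (String × String))) :=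
  let d := d.modify "general" [] (· ++ [entry])
  let category := (PySem.Dict.mk entry).getD "category" ""
  if pvCategoryMapping.contains category then
    d.modify (pvCategoryMapping.getD category "") [] (· ++ [entry])
  else d

def create_specialized_datasets (entries : List (List (String × String))) : List (String × List (List (String × String))) :=
  let datasets : PySem.Dict String (List (List (String × String))) :=
    PySem.Dict.ofList [("general", []), ("social_media", []), ("ecommerce", []),
      ("financial", []), ("streaming", [])]
  (entries.foldl pvStepA datasets).items

-- ===== PORT B =====
def pvCat (e : List (String × String)) : String := (PySem.Dict.mk e).getD "category" ""

def create_specialized_datasets_alt (entries : List (List (String × String))) : List (String × List (List (String × String))) :=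
  [("general", entries),
   ("social_media", entries.filter (fun e => pvCat e == "Social Media")),
   ("ecommerce", entries.filter (fun e => pvCat e == "E-commerce")),
   ("financial", entries.filter (fun e => pvCat e == "Financial Services" || pvCat e == "Cryptocurrency")),
   ("streaming", entries.filter (fun e => pvCat e == "Video Streaming" || pvCat e == "Music Streaming"))]

-- ===== PRECONDITION & SPEC =====
def Spec_create_specialized_datasets (entries : List (List (String × String))) (out : List (String × List (List (String × String)))) : Prop := out = create_specialized_datasets_alt entries
instance (entries : List (List (String × String))) (out : List (String × List (List (String × String)))) : Decidable (Spec_create_specialized_datasets entries out) := by unfold Spec_create_specialized_datasets; infer_instance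

-- ===== CLAIM (what is proved, stated in full; the proofs are below) =====
def Claim_equal_create_specialized_datasets : Prop := ∀ (entries : List (List (String × String))), Dom_create_specialized_datasets entries → Spec_create_specialized_datasets entries (create_specialized_datasets entries)

-- ===== LEMMAS AND PROOFS =====
lemma pvmap_eq : pvCategoryMapping = PySem.Dict.mk [("Social Media", "social_media"), ("E-commerce", "ecommerce"),
    ("Financial Services", "financial"), ("Cryptocurrency", "financial"),
    ("Video Streaming", "streaming"), ("Music Streaming", "streaming")] := by rfl

lemma pv_foldl_inv (l : List (List (String × String)))
    (g s ec f st : List (List (String × String))) :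
    (l.foldl pvStepA
      (PySem.Dict.mk [("general", g), ("social_media", s), ("ecommerce", ec),
        ("financial", f), ("streaming", st)])) =
    PySem.Dict.mk [("general", g ++ l),
      ("social_media", s ++ l.filter (fun e => pvCat e == "Social Media")),
      ("ecommerce", ec ++ l.filter (fun e => pvCat e == "E-commerce")),
      ("financial", f ++ l.filter (fun e => pvCat e == "Financial Services" || pvCat e == "Cryptocurrency")),
      ("streaming", st ++ l.filter (fun e => pvCat e == "Video Streaming" || pvCat e == "Music Streaming"))] := by
  induction l generalizing g s ec f st with
  | nil => simp
  | cons x l ih =>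
    rw [List.foldl_cons]
    by_cases h1 : pvCat x = "Social Media"
    · have hstep : pvStepA (PySem.Dict.mk [("general", g), ("social_media", s), ("ecommerce", ec), ("financial", f), ("streaming", st)]) x
          = PySem.Dict.mk [("general", g ++ [x]), ("social_media", s ++ [x]), ("ecommerce", ec), ("financial", f), ("streaming", st)] := by
        unfold pvStepA; unfold pvCat at h1; simp only [h1]; rfl
      rw [hstep, ih]
      simp [h1]
    by_cases h2 : pvCat x = "E-commerce"
    · have hstep : pvStepA (PySem.Dict.mk [("general", g), ("social_media", s), ("ecommerce", ec), ("financial", f), ("streaming", st)]) x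
          = PySem.Dict.mk [("general", g ++ [x]), ("social_media", s), ("ecommerce", ec ++ [x]), ("financial", f), ("streaming", st)] := by
        unfold pvStepA; unfold pvCat at h2; simp only [h2]; rfl
      rw [hstep, ih]
      simp [h2]
    by_cases h3 : pvCat x = "Financial Services"
    · have hstep : pvStepA (PySem.Dict.mk [("general", g), ("social_media", s), ("ecommerce", ec), ("financial", f), ("streaming", st)]) x
          = PySem.Dict.mk [("general", g ++ [x]), ("social_media", s), ("ecommerce", ec), ("financial", f ++ [x]), ("streaming", st)] := by
        unfold pvStepA; unfold pvCat at h3; simp only [h3]; rfl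
      rw [hstep, ih]
      simp [h3]
    by_cases h4 : pvCat x = "Cryptocurrency"
    · have hstep : pvStepA (PySem.Dict.mk [("general", g), ("social_media", s), ("ecommerce", ec), ("financial", f), ("streaming", st)]) x
          = PySem.Dict.mk [("general", g ++ [x]), ("social_media", s), ("ecommerce", ec), ("financial", f ++ [x]), ("streaming", st)] := by
        unfold pvStepA; unfold pvCat at h4; simp only [h4]; rfl
      rw [hstep, ih]
      simp [h4]
    by_cases h5 : pvCat x = "Video Streaming"
    · have hstep : pvStepA (PySem.Dict.mk [("general", g), ("social_media", s), ("ecommerce", ec), ("financial", f), ("streaming", st)]) x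
          = PySem.Dict.mk [("general", g ++ [x]), ("social_media", s), ("ecommerce", ec), ("financial", f), ("streaming", st ++ [x])] := by
        unfold pvStepA; unfold pvCat at h5; simp only [h5]; rfl
      rw [hstep, ih]
      simp [h5]
    by_cases h6 : pvCat x = "Music Streaming"
    · have hstep : pvStepA (PySem.Dict.mk [("general", g), ("social_media", s), ("ecommerce", ec), ("financial", f), ("streaming", st)]) x
          = PySem.Dict.mk [("general", g ++ [x]), ("social_media", s), ("ecommerce", ec), ("financial", f), ("streaming", st ++ [x])] := by
        unfold pvStepA; unfold pvCat at h6; simp only [h6]; rfl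
      rw [hstep, ih]
      simp [h6]
    have hc : pvCategoryMapping.contains (pvCat x) = false := by
      rw [pvmap_eq]
      simp only [PySem.Dict.contains_mk]
      simp
      exact ⟨fun h => h1 h.symm, fun h => h2 h.symm, fun h => h3 h.symm, fun h => h4 h.symm, fun h => h5 h.symm, fun h => h6 h.symm⟩
    have hstep : pvStepA (PySem.Dict.mk [("general", g), ("social_media", s), ("ecommerce", ec), ("financial", f), ("streaming", st)]) x
        = PySem.Dict.mk [("general", g ++ [x]), ("social_media", s), ("ecommerce", ec), ("financial", f), ("streaming", st)] := by
      unfold pvStepA; unfold pvCat at hc; simp only [hc]; rfl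
    rw [hstep, ih]
    simp [h1, h2, h3, h4, h5, h6]

-- ===== VERDICT (by name: the statement is the Claim_ definition above) =====
theorem create_specialized_datasets_spec : Claim_equal_create_specialized_datasets := by
  intro entries _
  unfold Spec_create_specialized_datasets create_specialized_datasets create_specialized_datasets_alt
  show (List.foldl pvStepA
      (PySem.Dict.mk [("general", []), ("social_media", []), ("ecommerce", []), ("financial", []), ("streaming", [])]) entries).items = _
  rw [pv_foldl_inv]
  simp
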